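-- pv_equiv track=rewrite | github.com/1000chw/baekjoon_solve | 프로그래머스/1/42840. 모의고사/모의고사.py | solution
-- ===== SOURCE A (Python) =====
-- def solution(answers):
--     answer = []
--     scores =  [no1(answers), no2(answers), no3(answers)]
--     maxScore = max(scores)
--     for i in range(3):
--         if scores[i] == maxScore:
--             answer.append(i+1)
--     return answer
--
-- def no1(answers):
--     pick = [1, 2, 3, 4, 5]
--     return getScore(len(pick), len(answers), pick, answers)
--
-- def no2(answers):
--     pick = [2, 1, 2, 3, 2, 4, 2, 5]
--     return getScore(len(pick), len(answers), pick, answers)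
--
-- def no3(answers):
--     pick = [3,3,1,1,2,2,4,4,5,5]
--     return getScore(len(pick), len(answers), pick, answers)
--
-- def getScore(p, l, pick, answers):
--     score = 0
--     for i in range(l):
--         score += 1 if pick[i%p] == answers[i] else 0
--     return score
-- ===== SOURCE B (Python) =====
-- def solution(answers):
--     patterns = [[1, 2, 3, 4, 5],
--                 [2, 1, 2, 3, 2, 4, 2, 5],
--                 [3, 3, 1, 1, 2, 2, 4, 4, 5, 5]]
--     scores = []
--     for k, pat in enumerate(patterns, 1):
--         queue = list(pat)     # rotating queue: no index/mod arithmetic anywhere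
--         hits = 0
--         for a in answers:
--             guess = queue.pop(0)
--             if guess == a:
--                 hits += 1
--             queue.append(guess)
--         scores.append((hits, k))
--     best = max(h for h, _ in scores)
--     return [k for h, k in scores if h == best]
-- ===== Notes on version B (the rewrite author's own statement) =====
-- stated objective: alternative
-- what changed: Replaces A's index arithmetic (range(l) loops with pick[i % p] lookups) by a rotating-queue mechanism: each pattern is kept as a queue whose head is popped, compared and re-appended per answer, so no index or modulus is ever computed; scores are kept as (score, index) pairs and the winners are selected by a comprehension instead of A's range(3) loop over a score list.
import Mathlib
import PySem

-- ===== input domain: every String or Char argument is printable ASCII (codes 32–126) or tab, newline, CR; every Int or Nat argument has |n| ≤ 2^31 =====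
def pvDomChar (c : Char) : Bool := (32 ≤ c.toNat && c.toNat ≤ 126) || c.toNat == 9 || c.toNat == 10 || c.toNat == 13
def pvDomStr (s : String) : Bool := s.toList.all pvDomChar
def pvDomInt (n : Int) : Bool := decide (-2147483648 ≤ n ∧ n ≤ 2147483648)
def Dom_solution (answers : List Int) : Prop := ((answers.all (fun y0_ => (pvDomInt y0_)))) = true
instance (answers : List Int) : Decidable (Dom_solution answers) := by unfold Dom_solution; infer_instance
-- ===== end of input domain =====

-- B replaces A's index/modulus pattern lookups by rotating queues (pop head, compare,
-- re-append) and selects winners from (score, index) pairs by a comprehension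
-- (objective: alternative decomposition, same cost).


-- ===== PORT A =====
def getScore (p l : Int) (pick answers : List Int) : Int :=
  (PySem.List.pyRange 0 l 1).foldl
    (fun score i =>
      score + (if PySem.List.pyGetD pick (PySem.Int.mod i p) 0 = PySem.List.pyGetD answers i 0 then 1 else 0))
    0

def no1 (answers : List Int) : Int :=
  let pick : List Int := [1, 2, 3, 4, 5]
  getScore (PySem.List.len pick) (PySem.List.len answers) pick answers

def no2 (answers : List Int) : Int :=
  let pick : List Int := [2, 1, 2, 3, 2, 4, 2, 5]
  getScore (PySem.List.len pick) (PySem.List.len answers) pick answers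

def no3 (answers : List Int) : Int :=
  let pick : List Int := [3, 3, 1, 1, 2, 2, 4, 4, 5, 5]
  getScore (PySem.List.len pick) (PySem.List.len answers) pick answers

def solution (answers : List Int) : List Int :=
  let scores : List Int := [no1 answers, no2 answers, no3 answers]
  -- Python's max over the (always 3-element, hence nonempty) list: max? is always some here
  let maxScore : Int := (PySem.List.max? scores (fun x => x)).getD 0
  (PySem.List.pyRange 0 3 1).foldl
    (fun answer i => answer ++ (if PySem.List.pyGetD scores i 0 = maxScore then [i + 1] else []))
    []

-- ===== PORT B =====
-- inner loop of Source B: queue.pop(0); compare; queue.append — the [] branch is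
-- unreachable (the queue keeps the pattern's positive length; Python's pop(0)
-- would raise only on an empty pattern, which never occurs)
def scoreRot (pat : List Int) (answers : List Int) : Int :=
  (answers.foldl
    (fun (st : List Int × Int) a =>
      match st.1 with
      | [] => st
      | g :: q => (q ++ [g], st.2 + (if g = a then 1 else 0)))
    (pat, 0)).2

def solution_alt (answers : List Int) : List Int :=
  let patterns : List (List Int) :=
    [[1, 2, 3, 4, 5], [2, 1, 2, 3, 2, 4, 2, 5], [3, 3, 1, 1, 2, 2, 4, 4, 5, 5]]
  let scores : List (Int × Int) :=
    (PySem.List.enumerate patterns 1).foldl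
      (fun acc kp => acc ++ [(scoreRot kp.2 answers, kp.1)]) []
  let best : Int := (PySem.List.max? (scores.map (fun hk => hk.1)) (fun x => x)).getD 0
  scores.foldl (fun acc hk => acc ++ (if hk.1 = best then [hk.2] else [])) []

-- ===== PRECONDITION & SPEC =====
def Spec_solution (answers : List Int) (out : List Int) : Prop := out = solution_alt answers
instance (answers : List Int) (out : List Int) : Decidable (Spec_solution answers out) := by unfold Spec_solution; infer_instance

-- ===== CLAIM =====
def Claim_equal_solution : Prop := ∀ (answers : List Int), Dom_solution answers → Spec_solution answers (solution answers)

-- ===== LEMMAS AND PROOFS =====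

-- A's per-pattern counting loop, as a fold over enumerate(answers)
theorem getScore_eq_enumFold (pat answers : List Int) :
    getScore (PySem.List.len pat) (PySem.List.len answers) pat answers
    = (PySem.List.enumerate answers 0).foldl
        (fun s ia =>
          s + (if PySem.List.pyGetD pat (PySem.Int.mod ia.1 (PySem.List.len pat)) 0 = ia.2 then 1 else 0))
        0 := by
  rw [PySem.List.enumerate_eq_map_pyRange (d := 0), List.foldl_map]
  rfl

-- rotating-queue invariant: after k rotations the queue is pat.rotate k, and the
-- fold from there counts matches against pat[(index) % len pat] from index k on
theorem rotFold (pat : List Int) (hp : pat ≠ []) (answers : List Int) :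
    ∀ (k : Nat) (s : Int),
      ((answers.foldl
        (fun (st : List Int × Int) a =>
          match st.1 with
          | [] => st
          | g :: q => (q ++ [g], st.2 + (if g = a then 1 else 0)))
        (pat.rotate k, s)).2)
      = (PySem.List.enumerate answers (k : Int)).foldl
          (fun s ia =>
            s + (if PySem.List.pyGetD pat (PySem.Int.mod ia.1 (PySem.List.len pat)) 0 = ia.2 then 1 else 0))
          s := by
  induction answers with
  | nil => intro k s; simp [PySem.List.enumerate_nil]
  | cons a ans ih =>
    intro k s
    have hlen : 0 < pat.length := List.length_pos_of_ne_nil hp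
    have hne : pat.rotate k ≠ [] := by
      simpa [← List.length_pos_iff] using hlen
    obtain ⟨h, t, hht⟩ := List.exists_cons_of_ne_nil hne
    have hhead : h = pat[k % pat.length]'(Nat.mod_lt _ hlen) := by
      have h0 : (pat.rotate k)[0]'(by simp [List.length_pos_of_ne_nil hp]) = h := by
        simp [hht]
      rw [List.getElem_rotate] at h0
      simpa using h0.symm
    have hnext : t ++ [h] = pat.rotate (k + 1) := by
      have : (pat.rotate k).rotate 1 = pat.rotate (k + 1) := List.rotate_rotate pat k 1
      rw [hht] at this
      simpa [List.rotate_cons_succ] using this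
    have hmod : PySem.List.pyGetD pat (PySem.Int.mod (k : Int) (PySem.List.len pat)) 0
        = pat[k % pat.length]'(Nat.mod_lt _ hlen) := by
      rw [PySem.List.len_eq, PySem.Int.mod_natCast, PySem.List.pyGetD_natCast]
      exact List.getD_eq_getElem _ _ _
    rw [PySem.List.enumerate_cons, List.foldl_cons, List.foldl_cons, hht]
    simp only []
    rw [hnext, ih (k + 1)]
    rw [hmod, hhead]
    norm_num

-- B's rotating-queue count equals A's index-mod count, for a nonempty pattern
theorem scoreRot_eq_getScore (pat answers : List Int) (hp : pat ≠ []) :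
    scoreRot pat answers
    = getScore (PySem.List.len pat) (PySem.List.len answers) pat answers := by
  rw [getScore_eq_enumFold]
  unfold scoreRot
  have := rotFold pat hp answers 0 0
  rw [List.rotate_zero] at this
  simpa using this

-- ===== VERDICT =====
theorem solution_spec : Claim_equal_solution := by
  intro answers _
  unfold Spec_solution solution solution_alt no1 no2 no3
  simp only [PySem.List.enumerate_cons, PySem.List.enumerate_nil, List.foldl_cons, List.foldl_nil]
  have e1 := scoreRot_eq_getScore [1, 2, 3, 4, 5] answers (by decide)
  have e2 := scoreRot_eq_getScore [2, 1, 2, 3, 2, 4, 2, 5] answers (by decide)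
  have e3 := scoreRot_eq_getScore [3, 3, 1, 1, 2, 2, 4, 4, 5, 5] answers (by decide)
  simp only [e1, e2, e3]
  set a := getScore (PySem.List.len [1, 2, 3, 4, 5]) (PySem.List.len answers) [1, 2, 3, 4, 5] answers with ha
  set b := getScore (PySem.List.len [2, 1, 2, 3, 2, 4, 2, 5]) (PySem.List.len answers) [2, 1, 2, 3, 2, 4, 2, 5] answers with hb
  set c := getScore (PySem.List.len [3, 3, 1, 1, 2, 2, 4, 4, 5, 5]) (PySem.List.len answers) [3, 3, 1, 1, 2, 2, 4, 4, 5, 5] answers with hc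
  have h3 : PySem.List.pyRange 0 3 1 = [0, 1, 2] := by decide
  rw [h3]
  simp only [List.foldl_cons, List.foldl_nil]
  simp only [PySem.List.pyGetD]
  rfl
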